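-- pv_equiv track=rewrite | github.com/SakshiModi/LeetCode-Coding-Solutions | LeetCode Contests/Weekly Contest 286/2216_minimum-deletions-to-make-array-beautiful.py | minDeletion
-- ===== SOURCE A (Python) =====
-- def minDeletion(nums):
--     ans=0
--     m=len(nums)
--     i=0
--     while(i<m):
--         if i%2==0:
--             if i+1<m and nums[i]==nums[i+1]:
--                 ans+=1
--                 nums.pop(i)
--                 m-=1
--             else:
--                 i+=1
--         else:
--             i+=1
--     if m%2!=0:
--         ans+=1
--     return ans
-- ===== SOURCE B (Python) =====
-- def minDeletion(nums):
--     # Single pass: count deletions directly via the parity of the kept prefix;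
--     # never mutates nums (A pops from its argument in place; B does not).
--     d = 0
--     n = len(nums)
--     for i in range(n - 1):
--         if (i - d) % 2 == 0 and nums[i] == nums[i + 1]:
--             d += 1
--     if (n - d) % 2 != 0:
--         d += 1
--     return d
-- ===== Notes on version B (the rewrite author's own statement) =====
-- stated objective: faster
-- what changed: B replaces A's while-loop that repeatedly pops from the list (each pop shifting the tail) with a single read-only pass that counts deletions and derives the current position parity as (i-d)%2, leaving nums unmutated.
import Mathlib
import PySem

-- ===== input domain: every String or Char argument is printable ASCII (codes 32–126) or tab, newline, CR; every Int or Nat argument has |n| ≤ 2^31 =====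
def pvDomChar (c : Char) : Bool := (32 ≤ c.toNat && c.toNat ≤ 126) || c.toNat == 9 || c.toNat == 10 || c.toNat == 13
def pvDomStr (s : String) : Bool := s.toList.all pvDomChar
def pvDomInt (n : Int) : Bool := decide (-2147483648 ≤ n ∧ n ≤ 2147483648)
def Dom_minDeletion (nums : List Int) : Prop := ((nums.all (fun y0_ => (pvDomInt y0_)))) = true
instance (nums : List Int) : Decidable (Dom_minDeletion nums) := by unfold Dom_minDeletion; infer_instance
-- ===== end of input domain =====

set_option maxRecDepth 8192


-- B counts deletions in one read-only pass instead of A's pop-in-place scan.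
-- A mutates its argument (nums.pop); the equivalence proved here is about the return value only.

-- ===== PORT A =====
-- A's while loop: i and m are always nonnegative (i starts at 0 and only increments,
-- m is the current length), so they are carried as Nat; nums.pop(i) is eraseIdx
-- (A discards the popped value); the short-circuit 'i+1<m and …' is the && guard.
def minDeletionLoopA (nums : List Int) (ans : Int) (m i : Nat) : Int × Nat :=
  if i < m then
    if i % 2 == 0 then
      if i + 1 < m && (PySem.List.pyGet? nums (i : Int) == PySem.List.pyGet? nums ((i : Int) + 1)) then
        minDeletionLoopA (nums.eraseIdx i) (ans + 1) (m - 1) i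
      else
        minDeletionLoopA nums ans m (i + 1)
    else
      minDeletionLoopA nums ans m (i + 1)
  else (ans, m)
termination_by m - i
decreasing_by all_goals omega

def minDeletion (nums : List Int) : Int :=
  let r := minDeletionLoopA nums 0 nums.length 0
  if r.2 % 2 ≠ 0 then r.1 + 1 else r.1

-- ===== PORT B =====
-- B's 'for i in range(n-1)' loop carrying the deletion count d.
def minDeletionLoopB (nums : List Int) (n : Nat) (d : Int) (i : Nat) : Int :=
  if i < n - 1 then
    if (PySem.Int.mod ((i : Int) - d) 2 == 0)
        && (PySem.List.pyGet? nums (i : Int) == PySem.List.pyGet? nums ((i : Int) + 1)) then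
      minDeletionLoopB nums n (d + 1) (i + 1)
    else
      minDeletionLoopB nums n d (i + 1)
  else d
termination_by n - 1 - i
decreasing_by all_goals omega

def minDeletion_alt (nums : List Int) : Int :=
  let n := nums.length
  let d := minDeletionLoopB nums n 0 0
  if PySem.Int.mod ((n : Int) - d) 2 ≠ 0 then d + 1 else d

-- ===== PRECONDITION & SPEC =====
def Spec_minDeletion (nums : List Int) (out : Int) : Prop := out = minDeletion_alt nums
instance (nums : List Int) (out : Int) : Decidable (Spec_minDeletion nums out) := by unfold Spec_minDeletion; infer_instance

-- ===== CLAIM (what is proved, stated in full; the proofs are below) =====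
def Claim_equal_minDeletion : Prop := ∀ (nums : List Int), Dom_minDeletion nums → Spec_minDeletion nums (minDeletion nums)

-- ===== LEMMAS AND PROOFS =====

-- Canonical count of in-scan deletions: the Bool says "current kept position is even".
def gDel : Bool → List Int → Nat
  | _, [] => 0
  | true, [_] => 0
  | true, x :: y :: rest => if x = y then 1 + gDel true (y :: rest) else gDel false (y :: rest)
  | false, _ :: rest => gDel true rest

theorem gDel_short (p : Bool) (xs : List Int) (h : xs.length ≤ 1) : gDel p xs = 0 := by
  match p, xs with
  | _, [] => cases p <;> rfl
  | true, [x] => rfl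
  | false, [x] => rfl
  | _, _ :: _ :: _ => simp at h

theorem gDel_le_length (p : Bool) (xs : List Int) : gDel p xs ≤ xs.length := by
  induction xs generalizing p with
  | nil => cases p <;> simp [gDel]
  | cons x xs ih =>
    cases p with
    | false => simpa [gDel] using Nat.le_succ_of_le (ih true)
    | true =>
      cases xs with
      | nil => simp [gDel]
      | cons y rest =>
        have h1 := ih true
        have h2 := ih false
        by_cases h : x = y <;> simp only [gDel, h, if_true, if_false, List.length_cons] at * <;> omega

theorem gDel_cons_eq (x y : Int) (rest : List Int) (h : x = y) :
    gDel true (x :: y :: rest) = 1 + gDel true (y :: rest) := by simp [gDel, h]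

theorem gDel_cons_ne (x y : Int) (rest : List Int) (h : x ≠ y) :
    gDel true (x :: y :: rest) = gDel false (y :: rest) := by simp [gDel, h]

theorem gDel_false_cons (x : Int) (rest : List Int) :
    gDel false (x :: rest) = gDel true rest := by simp [gDel]

theorem drop_eraseIdx_self (l : List Int) (i : Nat) (h : i < l.length) :
    (l.eraseIdx i).drop i = l.drop (i + 1) := by
  rw [List.eraseIdx_eq_take_drop_succ, List.drop_append]
  simp [Nat.min_eq_left (Nat.le_of_lt h)]

theorem loopA_eq (k : Nat) : ∀ (nums : List Int) (ans : Int) (m i : Nat),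
    m - i ≤ k → m = nums.length →
    minDeletionLoopA nums ans m i =
      (ans + (gDel (decide (i % 2 = 0)) (nums.drop i) : Int),
       m - gDel (decide (i % 2 = 0)) (nums.drop i)) := by
  induction k with
  | zero =>
    intro nums ans m i hk hm
    rw [minDeletionLoopA]
    have hlt : ¬ i < m := by omega
    have hd : nums.drop i = [] := List.drop_eq_nil_of_le (by omega)
    simp [hlt, hd, gDel_short]
  | succ k ih =>
    intro nums ans m i hk hm
    rw [minDeletionLoopA]
    by_cases hlt : i < m
    · simp only [if_pos hlt]
      have hilen : i < nums.length := hm ▸ hlt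
      have hdrop : nums.drop i = nums[i] :: nums.drop (i + 1) := List.drop_eq_getElem_cons hilen
      have hget : PySem.List.pyGet? nums (i : Int) = some nums[i] := by
        simp [List.getElem?_eq_getElem hilen]
      have hc1 : ((i : Int) + 1) = ((i + 1 : Nat) : Int) := by push_cast; ring
      by_cases hpar : i % 2 = 0
      · have hpb : (i % 2 == 0) = true := by simpa using hpar
        simp only [hpb, if_true]
        by_cases h2 : i + 1 < m
        · have h2len : i + 1 < nums.length := hm ▸ h2
          have hdrop2 : nums.drop (i + 1) = nums[i + 1] :: nums.drop (i + 2) :=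
            List.drop_eq_getElem_cons h2len
          have hget2 : PySem.List.pyGet? nums ((i : Int) + 1) = some nums[i + 1] := by
            rw [hc1, PySem.List.pyGet?_natCast, List.getElem?_eq_getElem h2len]
          by_cases heq : nums[i] = nums[i + 1]
          · have hcond : (i + 1 < m && (PySem.List.pyGet? nums (i : Int) == PySem.List.pyGet? nums ((i : Int) + 1))) = true := by
              simp [h2, hget, hget2, heq]
            simp only [hcond, if_true]
            rw [ih (nums.eraseIdx i) (ans + 1) (m - 1) i (by omega)
                  (by simp [List.length_eraseIdx, hilen]; omega)]
            rw [drop_eraseIdx_self nums i hilen]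
            have hg : gDel (decide (i % 2 = 0)) (nums.drop i)
                = 1 + gDel (decide (i % 2 = 0)) (nums.drop (i + 1)) := by
              rw [show (decide (i % 2 = 0)) = true by simpa using hpar, hdrop, hdrop2,
                gDel_cons_eq _ _ _ heq]
            rw [hg]
            refine Prod.ext ?_ ?_
            · push_cast; ring
            · simp; omega
          · have hcond : (i + 1 < m && (PySem.List.pyGet? nums (i : Int) == PySem.List.pyGet? nums ((i : Int) + 1))) = false := by
              simp [hget, hget2, heq]
            simp only [hcond, Bool.false_eq_true, if_false]
            rw [ih nums ans m (i + 1) (by omega) hm]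
            have hp2 : (decide ((i + 1) % 2 = 0)) = false := by simp; omega
            have hg : gDel (decide (i % 2 = 0)) (nums.drop i)
                = gDel false (nums.drop (i + 1)) := by
              rw [show (decide (i % 2 = 0)) = true by simpa using hpar, hdrop, hdrop2,
                gDel_cons_ne _ _ _ heq]
            rw [hg, hp2]
        · have hcond : (i + 1 < m && (PySem.List.pyGet? nums (i : Int) == PySem.List.pyGet? nums ((i : Int) + 1))) = false := by
            simp [h2]
          simp only [hcond, Bool.false_eq_true, if_false]
          rw [ih nums ans m (i + 1) (by omega) hm]
          have hd1 : nums.drop (i + 1) = [] := List.drop_eq_nil_of_le (by omega)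
          have hgi : gDel (decide (i % 2 = 0)) (nums.drop i) = 0 := by
            rw [hdrop, hd1]; exact gDel_short _ _ (by simp)
          simp [hd1, hgi, gDel_short]
      · have hpb : (i % 2 == 0) = false := by simpa using hpar
        simp only [hpb, Bool.false_eq_true, if_false]
        rw [ih nums ans m (i + 1) (by omega) hm]
        have hp2 : (decide ((i + 1) % 2 = 0)) = true := by simp; omega
        have hg : gDel (decide (i % 2 = 0)) (nums.drop i)
            = gDel true (nums.drop (i + 1)) := by
          rw [show (decide (i % 2 = 0)) = false by simpa using hpar, hdrop, gDel_false_cons]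
        rw [hg, hp2]
    · have hd : nums.drop i = [] := List.drop_eq_nil_of_le (by omega)
      simp [hlt, hd, gDel_short]

theorem loopB_eq (k : Nat) : ∀ (nums : List Int) (n : Nat) (d : Int) (i : Nat),
    n - 1 - i ≤ k → n = nums.length →
    minDeletionLoopB nums n d i =
      d + (gDel (decide (PySem.Int.mod ((i : Int) - d) 2 = 0)) (nums.drop i) : Int) := by
  induction k with
  | zero =>
    intro nums n d i hk hn
    rw [minDeletionLoopB]
    have hlt : ¬ i < n - 1 := by omega
    have hshort : (nums.drop i).length ≤ 1 := by simp; omega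
    simp [hlt, gDel_short _ _ hshort]
  | succ k ih =>
    intro nums n d i hk hn
    rw [minDeletionLoopB]
    by_cases hlt : i < n - 1
    · simp only [if_pos hlt]
      have h2len : i + 1 < nums.length := by omega
      have hilen : i < nums.length := by omega
      have hdrop : nums.drop i = nums[i] :: nums.drop (i + 1) := List.drop_eq_getElem_cons hilen
      have hdrop2 : nums.drop (i + 1) = nums[i + 1] :: nums.drop (i + 2) :=
        List.drop_eq_getElem_cons h2len
      have hget : PySem.List.pyGet? nums (i : Int) = some nums[i] := by
        simp [List.getElem?_eq_getElem hilen]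
      have hget2 : PySem.List.pyGet? nums ((i : Int) + 1) = some nums[i + 1] := by
        rw [show ((i : Int) + 1) = ((i + 1 : Nat) : Int) by push_cast; ring,
          PySem.List.pyGet?_natCast, List.getElem?_eq_getElem h2len]
      have hmod : PySem.Int.mod ((i : Int) - d) 2 = ((i : Int) - d) % 2 :=
        PySem.Int.mod_eq_emod_of_pos (by norm_num)
      have hmod2 : ∀ d' : Int, PySem.Int.mod (((i + 1 : Nat) : Int) - d') 2 = (((i : Int) + 1) - d') % 2 := by
        intro d'; rw [PySem.Int.mod_eq_emod_of_pos (by norm_num)]; push_cast; ring_nf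
      by_cases hpc : ((i : Int) - d) % 2 = 0
      · by_cases heq : nums[i] = nums[i + 1]
        · have hcond : ((PySem.Int.mod ((i : Int) - d) 2 == 0)
              && (PySem.List.pyGet? nums (i : Int) == PySem.List.pyGet? nums ((i : Int) + 1))) = true := by
            simp [hpc, hget, hget2, heq]
          simp only [hcond, if_true]
          rw [ih nums n (d + 1) (i + 1) (by omega) hn]
          have hpar' : (decide (PySem.Int.mod (((i + 1 : Nat) : Int) - (d + 1)) 2 = 0)) = true := by
            rw [hmod2]; simp; omega
          have hpar0 : (decide (PySem.Int.mod ((i : Int) - d) 2 = 0)) = true := by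
            rw [hmod]; simpa using hpc
          rw [hpar', hpar0]
          have hg : gDel true (nums.drop i) = 1 + gDel true (nums.drop (i + 1)) := by
            rw [hdrop, hdrop2, gDel_cons_eq _ _ _ heq]
          rw [hg]; push_cast; ring
        · have hcond : ((PySem.Int.mod ((i : Int) - d) 2 == 0)
              && (PySem.List.pyGet? nums (i : Int) == PySem.List.pyGet? nums ((i : Int) + 1))) = false := by
            simp [hget, hget2, heq]
          simp only [hcond, Bool.false_eq_true, if_false]
          rw [ih nums n d (i + 1) (by omega) hn]
          have hpar' : (decide (PySem.Int.mod (((i + 1 : Nat) : Int) - d) 2 = 0)) = false := by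
            rw [hmod2]; simp; omega
          have hpar0 : (decide (PySem.Int.mod ((i : Int) - d) 2 = 0)) = true := by
            rw [hmod]; simpa using hpc
          rw [hpar', hpar0]
          have hg : gDel true (nums.drop i) = gDel false (nums.drop (i + 1)) := by
            rw [hdrop, hdrop2, gDel_cons_ne _ _ _ heq]
          rw [hg]
      · have hcond : ((PySem.Int.mod ((i : Int) - d) 2 == 0)
            && (PySem.List.pyGet? nums (i : Int) == PySem.List.pyGet? nums ((i : Int) + 1))) = false := by
          simp [hpc]
        simp only [hcond, Bool.false_eq_true, if_false]
        rw [ih nums n d (i + 1) (by omega) hn]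
        have hpar' : (decide (PySem.Int.mod (((i + 1 : Nat) : Int) - d) 2 = 0)) = true := by
          rw [hmod2]; simp; omega
        have hpar0 : (decide (PySem.Int.mod ((i : Int) - d) 2 = 0)) = false := by
          rw [hmod]; simpa using hpc
        rw [hpar', hpar0]
        have hg : gDel false (nums.drop i) = gDel true (nums.drop (i + 1)) := by
          rw [hdrop, gDel_false_cons]
        rw [hg]
    · have hshort : (nums.drop i).length ≤ 1 := by simp; omega
      simp [hlt, gDel_short _ _ hshort]

-- ===== VERDICT (by name: the statement is the Claim_ definition above) =====
theorem minDeletion_spec : Claim_equal_minDeletion := by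
  intro nums _
  unfold Spec_minDeletion minDeletion minDeletion_alt
  have hA := loopA_eq (nums.length) nums 0 nums.length 0 (by omega) rfl
  have hB := loopB_eq (nums.length) nums nums.length 0 0 (by omega) rfl
  have h00 : (decide (PySem.Int.mod (((0 : Nat) : Int) - 0) 2 = 0)) = true := by
    rw [PySem.Int.mod_eq_emod_of_pos (by norm_num)]; simp
  rw [h00] at hB
  simp only [List.drop_zero, decide_true, Nat.zero_mod] at hA hB
  have hle := gDel_le_length true nums
  simp only [hA, hB]
  rw [PySem.Int.mod_eq_emod_of_pos (by norm_num)]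
  have hiff : (((nums.length : Int) - (0 + (gDel true nums : Int))) % 2 ≠ 0)
      ↔ ((nums.length - gDel true nums) % 2 ≠ 0) := by omega
  by_cases hp : (nums.length - gDel true nums) % 2 ≠ 0
  · rw [if_pos hp, if_pos (hiff.mpr hp)]
  · rw [if_neg hp, if_neg (fun h => hp (hiff.mp h))]
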